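-- pv_equiv track=rewrite | github.com/NWAFU-LiuLab/m6Aminer | other_code/classifier_compare/classifier_compare.py | hash1
-- ===== SOURCE A (Python) =====
-- def hash1(seq):
--     binary_dictionary={'A':0, 'C':1, 'G':2, 'T':3}
--     seq=seq.strip('N')
--     seq_len=len(seq)
--     cnt=[]
--     for i in seq:
--         cnt.append(binary_dictionary[i])
--     v2=[]
--     for p in range(0,seq_len-1):
--         v2.append(4*cnt[p]+cnt[p+1])
--     return v2
-- ===== SOURCE B (Python) =====
-- def hash1(seq):
--     # rolling 2-mer encoding: keep the base-4 value of the last two bases mod 16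
--     seq = seq.strip('N')
--     out = []
--     v = 0
--     first = True
--     for ch in seq:
--         v = (v * 4 + 'ACGT'.index(ch)) % 16
--         if first:
--             first = False
--         else:
--             out.append(v)
--     return out
-- ===== Notes on version B (the rewrite author's own statement) =====
-- stated objective: alternative
-- what changed: Replaces A's two staged passes (per-character code list, then an index-driven pair loop) with a rolling 2-mer encoding: one accumulator holds the base-4 value of the last two bases mod 16 and is emitted from the second character on, so the intermediate code list and all indexing disappear.
import Mathlib
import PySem

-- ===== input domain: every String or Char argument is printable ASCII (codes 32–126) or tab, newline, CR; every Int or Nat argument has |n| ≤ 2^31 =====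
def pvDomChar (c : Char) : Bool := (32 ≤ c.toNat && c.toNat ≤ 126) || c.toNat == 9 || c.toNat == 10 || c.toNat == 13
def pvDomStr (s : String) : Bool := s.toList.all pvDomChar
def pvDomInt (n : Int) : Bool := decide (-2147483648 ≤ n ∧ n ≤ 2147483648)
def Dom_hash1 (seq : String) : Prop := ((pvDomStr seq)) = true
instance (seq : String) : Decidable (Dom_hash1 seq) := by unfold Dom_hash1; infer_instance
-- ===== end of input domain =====

-- B replaces A's staged passes (code list, then index-driven pair loop) by a rolling
-- 2-mer accumulator (value of the last two bases mod 16), objective: alternative.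

-- ===== PORT A =====
-- binary_dictionary of A, as a top-level helper
def pvBd : PySem.Dict Char Int :=
  ((((PySem.Dict.empty).insert 'A' 0).insert 'C' 1).insert 'G' 2).insert 'T' 3
def hash1 (seq : String) : List Int :=
  let bd : PySem.Dict Char Int := pvBd
  let seq2 := PySem.Str.stripChars seq "N"
  let seqLen : Int := PySem.Str.len seq2
  let cnt : List Int := seq2.toList.foldl (fun acc i => acc ++ [bd.getD i 0]) []
  let v2 : List Int := (PySem.List.pyRange 0 (seqLen - 1) 1).foldl
    (fun acc p => acc ++ [4 * PySem.List.pyGetD cnt p 0 + PySem.List.pyGetD cnt (p + 1) 0]) []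
  v2

-- ===== PORT B =====
-- 'ACGT'.index(ch) is ported as PySem.Str.find, exact whenever ch occurs in 'ACGT'
-- (Pre_hash1 guarantees that; Python .index raises ValueError otherwise, outside Pre_).
def pvStep (st : Int × Bool × List Int) (ch : Char) : Int × Bool × List Int :=
  let v := PySem.Int.mod (st.1 * 4 + PySem.Str.find "ACGT" (String.singleton ch)) 16
  if st.2.1 then (v, false, st.2.2) else (v, false, st.2.2 ++ [v])
def hash1_alt (seq : String) : List Int :=
  let s := PySem.Str.stripChars seq "N"
  (s.toList.foldl pvStep (0, true, [])).2.2

-- ===== PRECONDITION & SPEC =====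
-- Pre_ excludes exactly the inputs where A raises KeyError: a character other than
-- A/C/G/T remaining after stripping leading/trailing 'N's.
def Pre_hash1 (seq : String) : Prop :=
  ((PySem.Str.stripChars seq "N").toList.all
    (fun c => c == 'A' || c == 'C' || c == 'G' || c == 'T')) = true
instance (seq : String) : Decidable (Pre_hash1 seq) := by unfold Pre_hash1; infer_instance
def pvWitness_hash1 : String := "NACGTAN"
def Spec_hash1 (seq : String) (out : List Int) : Prop := out = hash1_alt seq
instance (seq : String) (out : List Int) : Decidable (Spec_hash1 seq out) := by unfold Spec_hash1; infer_instance

-- ===== CLAIM (what is proved, stated in full; the proofs are below) =====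
def Claim_equal_hash1 : Prop := ∀ (seq : String), Dom_hash1 seq → Pre_hash1 seq → Spec_hash1 seq (hash1 seq)

-- ===== LEMMAS AND PROOFS =====

-- abbreviation used only in the proofs: the code of one character in B's sense
def pvCode (c : Char) : Int := PySem.Str.find "ACGT" (String.singleton c)

-- the recursive shape of B's emitted list: r is (value so far) % 4
def pvPairs (r : Int) : List Char → List Int
  | [] => []
  | c :: cs => (4 * r + pvCode c) :: pvPairs (pvCode c) cs

theorem pvCode_ok (c : Char) (hc : ((c = 'A' ∨ c = 'C') ∨ c = 'G') ∨ c = 'T') :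
    pvCode c = PySem.Dict.getD pvBd c 0 ∧ 0 ≤ pvCode c ∧ pvCode c < 4 := by
  rcases hc with ((h | h) | h) | h <;> subst h <;> decide

-- A's index-driven pair walk over any list equals the zip-with-tail pass
theorem pairIdx_eq_zip (xs : List Int) :
    (PySem.List.pyRange 0 ((xs.length : Int) - 1) 1).map
      (fun p => 4 * PySem.List.pyGetD xs p 0 + PySem.List.pyGetD xs (p + 1) 0)
    = (xs.zip xs.tail).map (fun q => 4 * q.1 + q.2) := by
  apply List.ext_getElem
  · simp [PySem.List.length_pyRange_one, List.length_zip]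
  · intro k h1 h2
    have hk : k < xs.length - 1 := by
      simpa [PySem.List.length_pyRange_one] using h1
    simp only [List.getElem_map]
    rw [PySem.List.getElem_pyRange_one]
    simp only [zero_add]
    have e1 : PySem.List.pyGetD xs (k : Int) 0 = xs[k]'(by omega) := by
      rw [PySem.List.pyGetD_natCast]; simp [(by omega : k < xs.length)]
    have e2 : PySem.List.pyGetD xs ((k : Int) + 1) 0 = xs[k + 1]'(by omega) := by
      have : ((k : Int) + 1) = ((k + 1 : Nat) : Int) := by push_cast; ring
      rw [this, PySem.List.pyGetD_natCast]
      simp [(by omega : k + 1 < xs.length)]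
    have hz : (xs.zip xs.tail)[k]'(by simpa using h2) =
        (xs[k]'(by omega), xs[k + 1]'(by omega)) := by
      simp [List.getElem_zip, List.getElem_tail]
    rw [e1, e2]
    simp [hz]

-- A's full result, characterised as the pair map over the stripped characters
theorem hash1_eq_pairmap (seq : String) :
    hash1 seq = (((PySem.Str.stripChars seq "N").toList.map (fun c => PySem.Dict.getD pvBd c 0)).zip
        ((PySem.Str.stripChars seq "N").toList.map (fun c => PySem.Dict.getD pvBd c 0)).tail).map
        (fun q => 4 * q.1 + q.2) := by
  unfold hash1
  simp only [PySem.List.foldl_append_singleton_eq_map, List.nil_append]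
  have hlen : PySem.Str.len (PySem.Str.stripChars seq "N")
      = ((((PySem.Str.stripChars seq "N").toList.map (fun c => PySem.Dict.getD pvBd c 0)).length : Int)) := by
    simp [PySem.Str.len]
  rw [hlen, pairIdx_eq_zip]

-- B's loop invariant: after the first character, each step appends 4*(v%4)+code c
theorem B_loop (l : List Char) (v : Int) (out : List Int)
    (hl : ∀ c ∈ l, ((c = 'A' ∨ c = 'C') ∨ c = 'G') ∨ c = 'T') (hv : 0 ≤ v) :
    (l.foldl pvStep (v, false, out)).2.2 = out ++ pvPairs (PySem.Int.mod v 4) l := by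
  induction l generalizing v out with
  | nil => simp [pvPairs]
  | cons c cs ih =>
    have hc := pvCode_ok c (hl c (by simp))
    have hmod16 : PySem.Int.mod (v * 4 + pvCode c) 16 = (v * 4 + pvCode c) % 16 :=
      PySem.Int.mod_eq_emod_of_pos (by omega)
    have hmod4v : PySem.Int.mod v 4 = v % 4 := PySem.Int.mod_eq_emod_of_pos (by omega)
    have hw : PySem.Int.mod (v * 4 + pvCode c) 16 = 4 * PySem.Int.mod v 4 + pvCode c := by
      rw [hmod16, hmod4v]; omega
    have hw0 : 0 ≤ PySem.Int.mod (v * 4 + pvCode c) 16 := by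
      rw [hmod16]; omega
    have hwm : PySem.Int.mod (PySem.Int.mod (v * 4 + pvCode c) 16) 4 = pvCode c := by
      rw [(PySem.Int.mod_eq_emod_of_pos (by omega) : PySem.Int.mod (PySem.Int.mod (v * 4 + pvCode c) 16) 4 = _), hmod16]; omega
    simp only [List.foldl_cons, pvStep, pvCode] at *
    simp only [if_neg (by simp : ¬ (false = true))]
    rw [ih _ _ (fun x hx => hl x (by simp [hx])) hw0, hwm, pvPairs, hw]
    simp [pvCode]

-- pvPairs equals the pair map over a nonempty list of A/C/G/T characters
theorem pvPairs_eq_zip (l : List Char) (a : Char)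
    (ha : ((a = 'A' ∨ a = 'C') ∨ a = 'G') ∨ a = 'T')
    (hl : ∀ c ∈ l, ((c = 'A' ∨ c = 'C') ∨ c = 'G') ∨ c = 'T') :
    pvPairs (pvCode a) l
      = (((a :: l).map (fun c => PySem.Dict.getD pvBd c 0)).zip
          (l.map (fun c => PySem.Dict.getD pvBd c 0))).map (fun q => 4 * q.1 + q.2) := by
  induction l generalizing a with
  | nil => simp [pvPairs]
  | cons c cs ih =>
    have hc := pvCode_ok c (hl c (by simp))
    have ha' := pvCode_ok a ha
    simp only [pvPairs, List.map_cons, List.zip_cons_cons, List.map_cons]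
    rw [ih c (hl c (by simp)) (fun x hx => hl x (by simp [hx]))]
    simp [ha'.1, hc.1]

-- B's full result on a list of A/C/G/T characters
theorem alt_eq (L : List Char)
    (hl : ∀ c ∈ L, ((c = 'A' ∨ c = 'C') ∨ c = 'G') ∨ c = 'T') :
    (L.foldl pvStep (0, true, [])).2.2
      = ((L.map (fun c => PySem.Dict.getD pvBd c 0)).zip
          (L.map (fun c => PySem.Dict.getD pvBd c 0)).tail).map (fun q => 4 * q.1 + q.2) := by
  cases L with
  | nil => simp
  | cons a l =>
    have ha := hl a (by simp)
    have hca := pvCode_ok a ha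
    have hfirst : pvStep (0, true, []) a
        = (PySem.Int.mod (0 * 4 + pvCode a) 16, false, ([] : List Int)) := by
      simp [pvStep, pvCode]
    have hv1 : PySem.Int.mod (0 * 4 + pvCode a) 16 = pvCode a := by
      rw [(PySem.Int.mod_eq_emod_of_pos (by omega) : PySem.Int.mod (0 * 4 + pvCode a) 16 = _)]
      omega
    have hv1m : PySem.Int.mod (pvCode a) 4 = pvCode a := by
      rw [(PySem.Int.mod_eq_emod_of_pos (by omega) : PySem.Int.mod (pvCode a) 4 = _)]
      omega
    rw [List.foldl_cons, hfirst, hv1,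
      B_loop l (pvCode a) [] (fun x hx => hl x (by simp [hx])) hca.2.1, hv1m,
      pvPairs_eq_zip l a ha (fun x hx => hl x (by simp [hx]))]
    simp

theorem hash1_spec : Claim_equal_hash1 := by
  intro seq _ hpre
  unfold Pre_hash1 at hpre
  unfold Spec_hash1
  rw [hash1_eq_pairmap]
  have hall : ∀ c ∈ (PySem.Str.stripChars seq "N").toList,
      ((c = 'A' ∨ c = 'C') ∨ c = 'G') ∨ c = 'T' := by
    intro c hc
    have := List.all_eq_true.mp hpre c hc
    simp only [Bool.or_eq_true, beq_iff_eq] at this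
    tauto
  have halt : hash1_alt seq
      = ((PySem.Str.stripChars seq "N").toList.foldl pvStep (0, true, [])).2.2 := rfl
  rw [halt, alt_eq _ hall]
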